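-- pv_equiv track=rewrite | github.com/Anita-phymath11/quera.Anita | mots.py | get_repeated_sum
-- ===== SOURCE A (Python) =====
-- def get_repeated_sum(name):
--     """The number of repeated letters in
--     all these words is displayed according to the number and names entered.
--
--     Args:
--         name (str): input names.
--
--     Returns:
--         int: the number of repeated letters in each name
--     """
--     count = 0
--     freq_dict = {}
--
--     for char in name:
--         if char in freq_dict:
--             freq_dict[char] += 1
--         else:
--             freq_dict[char] = 0
--
--     for value in freq_dict.values():
--         if value >= 1:
--             count += value
--
--     return count
-- ===== SOURCE B (Python) =====
-- def get_repeated_sum(name):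
--     """Closed form: total characters minus distinct characters."""
--     return len(name) - len(set(name))
-- ===== Notes on version B (the rewrite author's own statement) =====
-- stated objective: simpler
-- what changed: Replaced the frequency-dict build loop plus value-summing loop with the closed form len(name) - len(set(name)), which equals the sum of (occurrences - 1) over distinct characters.
import Mathlib
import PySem

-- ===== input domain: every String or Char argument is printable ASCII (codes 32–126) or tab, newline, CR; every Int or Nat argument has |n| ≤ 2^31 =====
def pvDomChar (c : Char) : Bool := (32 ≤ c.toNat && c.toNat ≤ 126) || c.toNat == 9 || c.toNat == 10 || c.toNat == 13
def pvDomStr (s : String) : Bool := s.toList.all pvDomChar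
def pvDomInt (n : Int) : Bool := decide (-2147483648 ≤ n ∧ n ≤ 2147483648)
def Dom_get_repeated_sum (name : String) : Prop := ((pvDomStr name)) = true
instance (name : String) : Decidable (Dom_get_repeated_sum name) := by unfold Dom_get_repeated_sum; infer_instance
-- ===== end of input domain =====

-- B replaces A's two counting loops with the closed form len(name) - len(set(name)); objective: simpler.

-- ===== PORT A =====
-- first loop: build freq_dict (value = occurrences - 1, since a fresh key is given 0)
def pvFreqStep (d : PySem.Dict Char Int) (c : Char) : PySem.Dict Char Int :=
  if d.contains c then d.insert c (d.getD c 0 + 1) else d.insert c 0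

def get_repeated_sum (name : String) : Int :=
  let freq_dict := name.toList.foldl pvFreqStep PySem.Dict.empty
  freq_dict.values.foldl (fun count v => if v ≥ 1 then count + v else count) 0

-- ===== PORT B =====
def get_repeated_sum_alt (name : String) : Int :=
  PySem.Str.len name - PySem.Set.len (PySem.Set.ofList name.toList)

-- ===== PRECONDITION & SPEC =====
def Spec_get_repeated_sum (name : String) (out : Int) : Prop := out = get_repeated_sum_alt name
instance (name : String) (out : Int) : Decidable (Spec_get_repeated_sum name out) := by unfold Spec_get_repeated_sum; infer_instance

-- ===== CLAIM (what is proved, stated in full; the proofs are below) =====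
def Claim_equal_get_repeated_sum : Prop := ∀ (name : String), Dom_get_repeated_sum name → Spec_get_repeated_sum name (get_repeated_sum name)

-- ===== LEMMAS AND PROOFS =====

-- the branchy update of A is the single insert with default -1
theorem pvFreqStep_eq (d : PySem.Dict Char Int) (c : Char) :
    pvFreqStep d c = d.insert c (d.getD c (-1) + 1) := by
  unfold pvFreqStep
  by_cases h : d.contains c
  · simp only [h, if_true]
    have : d.getD c 0 = d.getD c (-1) := by
      rw [PySem.Dict.getD_eq_get?_getD, PySem.Dict.getD_eq_get?_getD]
      have := PySem.Dict.contains_eq_isSome_get? (d := d) (k := c)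
      rw [this] at h
      cases hg : d.get? c with
      | none => rw [hg] at h; simp at h
      | some v => simp
    rw [this]
  · have h' : d.contains c = false := by simpa using h
    rw [if_neg (by simp [h']), PySem.Dict.getD_of_not_contains (d := d) (k := c) (d0 := -1) h']
    norm_num

-- A's first loop computes occurrences - 1 at every key (default -1)
theorem pvFreq_getD (l : List Char) (d : PySem.Dict Char Int) (v : Char) :
    (l.foldl pvFreqStep d).getD v (-1) = d.getD v (-1) + l.count v := by
  induction l generalizing d with
  | nil => simp
  | cons c t ih =>
      simp only [List.foldl_cons, ih, pvFreqStep_eq, PySem.Dict.getD_insert, List.count_cons]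
      by_cases h : v = c
      · subst h; simp; ring
      · have h' : ¬ (c = v) := fun e => h e.symm
        simp [h, h']

-- summing with the "≥ 1" guard over nonnegative values is the plain sum
theorem pvGuardedSum (vs : List Int) (acc : Int) (h : ∀ v ∈ vs, 0 ≤ v) :
    vs.foldl (fun count v => if v ≥ 1 then count + v else count) acc = acc + vs.sum := by
  induction vs generalizing acc with
  | nil => simp
  | cons v t ih =>
      have hv : 0 ≤ v := h v (by simp)
      have ht : ∀ w ∈ t, 0 ≤ w := fun w hw => h w (by simp [hw])
      simp only [List.foldl_cons, List.sum_cons, ih _ ht]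
      by_cases h1 : v ≥ 1
      · simp [h1]
        ring
      · have : v = 0 := by omega
        simp [this]

-- total length is the sum of counts over the distinct elements
theorem pvSumCounts (l : List Char) :
    ((PySem.Set.ofList l).map (fun c => (l.count c : Int))).sum = (l.length : Int) := by
  have hperm : (PySem.Set.ofList l).Perm l.dedup := by
    apply (List.perm_ext_iff_of_nodup (PySem.Set.nodup_ofList l) (List.nodup_dedup l)).2
    intro a
    rw [PySem.Set.mem_ofList, List.mem_dedup]
  have := (hperm.map (fun c => (l.count c : Int))).sum_eq
  rw [this]
  have hn : ((l.dedup.map fun x => l.count x).sum = l.length) :=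
    List.sum_map_count_dedup_eq_length l
  have : (l.dedup.map (fun c => (l.count c : Int))).sum
      = ((l.dedup.map fun x => l.count x).sum : Int) := by
    induction l.dedup with
    | nil => simp
    | cons a t ih => simp [ih]
  rw [this, hn]

theorem get_repeated_sum_eq (name : String) :
    get_repeated_sum name = get_repeated_sum_alt name := by
  unfold get_repeated_sum get_repeated_sum_alt
  set l := name.toList with hl
  set D := l.foldl pvFreqStep PySem.Dict.empty with hD
  have hkeys : D.keys = PySem.Set.ofList l := by
    have : D = l.foldl (fun d c => d.insert c (d.getD c (-1) + 1)) PySem.Dict.empty := by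
      rw [hD]; congr 1; funext d c; exact pvFreqStep_eq d c
    rw [this, PySem.Dict.keys_foldl_insert]
    simp [PySem.Set.update, PySem.Set.ofList_eq_foldl, PySem.Dict.keys_empty]
  have hnodup : D.keys.Nodup := by rw [hkeys]; exact PySem.Set.nodup_ofList l
  have hgetD : ∀ v, D.getD v (-1) = l.count v - 1 := by
    intro v
    rw [hD, pvFreq_getD, PySem.Dict.getD_empty]
    ring
  have hvals : D.values = (PySem.Set.ofList l).map (fun c => (l.count c : Int) - 1) := by
    rw [PySem.Dict.values_eq_map_keys D hnodup (-1), hkeys]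
    exact List.map_congr_left (fun c _ => hgetD c)
  have hnonneg : ∀ v ∈ D.values, 0 ≤ v := by
    rw [hvals]
    intro v hv
    obtain ⟨c, hc, hcv⟩ := List.mem_map.1 hv
    have : c ∈ l := (PySem.Set.mem_ofList l c).1 hc
    have : 1 ≤ l.count c := List.count_pos_iff.2 this
    omega
  rw [pvGuardedSum D.values 0 hnonneg, hvals]
  have hsplit : ((PySem.Set.ofList l).map (fun c => (l.count c : Int) - 1)).sum
      = ((PySem.Set.ofList l).map (fun c => (l.count c : Int))).sum
        - ((PySem.Set.ofList l).length : Int) := by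
    induction PySem.Set.ofList l with
    | nil => simp
    | cons a t ih => simp [ih]; ring
  rw [hsplit, pvSumCounts]
  simp [PySem.Str.len_eq, PySem.Set.len, hl]

-- ===== VERDICT (by name: the statement is the Claim_ definition above) =====
theorem get_repeated_sum_spec : Claim_equal_get_repeated_sum := by
  intro name _
  exact get_repeated_sum_eq name
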